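-- pv_equiv track=rewrite | github.com/Zedmor/hackerrank-puzzles | diuverse_deputation.py | check_for_man_and_woman
-- ===== SOURCE A (Python) =====
-- def check_for_man_and_woman(set_of_candidates):
--     woman_counter = 0
--     man_counter = 0
--     for el in set_of_candidates:
--         if 'w' in el:
--             woman_counter += 1
--         else:
--             man_counter += 1
--     return man_counter > 0 and woman_counter > 0
-- ===== SOURCE B (Python) =====
-- def check_for_man_and_woman(set_of_candidates):
--     # Two staged short-circuiting scans instead of one full counting pass:
--     # stop at the first woman, then at the first man.
--     has_woman = any('w' in el for el in set_of_candidates)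
--     has_man = any('w' not in el for el in set_of_candidates)
--     return has_woman and has_man
-- ===== Notes on version B (the rewrite author's own statement) =====
-- stated objective: idiomatic
-- what changed: Replaces the single exhaustive pass with two running counters by two staged short-circuiting any() scans (first woman, first man) combined with and.
import Mathlib
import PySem

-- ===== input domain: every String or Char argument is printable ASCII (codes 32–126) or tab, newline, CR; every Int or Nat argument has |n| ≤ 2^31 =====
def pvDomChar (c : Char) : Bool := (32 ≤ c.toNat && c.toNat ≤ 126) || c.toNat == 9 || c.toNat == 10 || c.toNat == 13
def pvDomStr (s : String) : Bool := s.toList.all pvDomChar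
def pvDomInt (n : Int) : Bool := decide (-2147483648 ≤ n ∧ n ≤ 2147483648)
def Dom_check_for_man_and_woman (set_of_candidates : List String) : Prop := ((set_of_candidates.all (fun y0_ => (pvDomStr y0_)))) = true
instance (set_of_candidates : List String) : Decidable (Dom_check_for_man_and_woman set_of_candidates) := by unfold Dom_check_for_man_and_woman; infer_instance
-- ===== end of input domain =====

-- B replaces the exhaustive counting pass by two staged short-circuiting any() scans; objective: idiomatic.
-- ===== PORT A =====
-- A: one full pass maintaining two counters, then both positive.
def check_for_man_and_woman (set_of_candidates : List String) : Bool :=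
  let p := set_of_candidates.foldl
    (fun (p : Int × Int) el =>
      if PySem.Str.isIn "w" el then (p.1 + 1, p.2) else (p.1, p.2 + 1))
    (0, 0)
  decide (p.2 > 0) && decide (p.1 > 0)

-- ===== PORT B =====
-- B: two short-circuiting any-scans (List.any short-circuits like Python's any).
def check_for_man_and_woman_alt (set_of_candidates : List String) : Bool :=
  let has_woman := set_of_candidates.any (fun el => PySem.Str.isIn "w" el)
  let has_man := set_of_candidates.any (fun el => !PySem.Str.isIn "w" el)
  has_woman && has_man

-- ===== PRECONDITION & SPEC =====
def Spec_check_for_man_and_woman (set_of_candidates : List String) (out : Bool) : Prop := out = check_for_man_and_woman_alt set_of_candidates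
instance (set_of_candidates : List String) (out : Bool) : Decidable (Spec_check_for_man_and_woman set_of_candidates out) := by unfold Spec_check_for_man_and_woman; infer_instance

-- ===== CLAIM (what is proved, stated in full; the proofs are below) =====
def Claim_equal_check_for_man_and_woman : Prop := ∀ (set_of_candidates : List String), Dom_check_for_man_and_woman set_of_candidates → Spec_check_for_man_and_woman set_of_candidates (check_for_man_and_woman set_of_candidates)

-- ===== LEMMAS AND PROOFS =====
lemma cfmw_fold (xs : List String) (a b : Int) :
    xs.foldl (fun (p : Int × Int) el =>
        if PySem.Str.isIn "w" el then (p.1 + 1, p.2) else (p.1, p.2 + 1)) (a, b)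
      = (a + (xs.countP (fun el => PySem.Str.isIn "w" el) : Int),
         b + (xs.countP (fun el => !PySem.Str.isIn "w" el) : Int)) := by
  induction xs generalizing a b with
  | nil => simp
  | cons x xs ih =>
    by_cases h : PySem.Str.isIn "w" x
    · rw [List.foldl_cons, if_pos h, ih]
      simp only [List.countP_cons, h, Prod.mk.injEq, Bool.not_true, if_true, if_false, reduceIte]
      constructor <;> push_cast <;> ring
    · rw [List.foldl_cons, if_neg h, ih]
      have h' : PySem.Str.isIn "w" x = false := by simpa using h
      simp only [List.countP_cons, h', Bool.not_false, if_true, if_false, reduceIte,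
        Prod.mk.injEq]
      constructor <;> push_cast <;> ring

lemma cfmw_count_pos (xs : List String) (p : String → Bool) :
    decide ((0 : Int) + (xs.countP p : Int) > 0) = xs.any p := by
  rw [zero_add]
  by_cases h : ∃ el ∈ xs, p el = true
  · have : 0 < xs.countP p := List.countP_pos_iff.mpr (by simpa using h)
    have hx : xs.any p = true := List.any_eq_true.mpr h
    rw [hx]
    simpa using this
  · have : xs.countP p = 0 := by
      rw [List.countP_eq_zero]
      intro el hm
      simp only [not_exists, not_and] at h
      simpa using h el hm
    have hx : xs.any p = false := by
      rw [List.any_eq_false]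
      intro el hm
      simp only [not_exists, not_and] at h
      simpa using h el hm
    rw [hx, this]
    simp

-- ===== VERDICT (by name: the statement is the Claim_ definition above) =====
theorem check_for_man_and_woman_spec : Claim_equal_check_for_man_and_woman := by
  intro xs _
  unfold Spec_check_for_man_and_woman check_for_man_and_woman check_for_man_and_woman_alt
  simp only [cfmw_fold, cfmw_count_pos]
  exact Bool.and_comm _ _
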